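-- pv_equiv track=rewrite | github.com/ShawnYS-codemtl/mcgill-comp202 | assignment3/markov.py | get_grams
-- ===== SOURCE A (Python) =====
-- def get_grams(text, k):
--     ''' (str, int) -> dict
--     Returns a dictionary of k-grams, using the input string text and the given positive integer k.
--
--     >>> get_grams('gagggagaggcgagaaa', 2)
--     {'ga': {'g': 4, 'a': 1}, 'ag': {'g': 2, 'a': 2}, 'gg': {'g': 1, 'a': 1, 'c': 1}, 'gc': {'g': 1}, 'cg': {'a': 1}, 'aa': {'a': 1}}
--
--     >>> get_grams("She sells sea shells by the sea shore.", 1)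
--     {'S': {'h': 1}, 'h': {'e': 3, 'o': 1}, 'e': {' ': 2, 'l': 2, 'a': 2, '.': 1}, ' ': {'s': 5, 'b': 1, 't': 1}, 's': {'e': 3, ' ': 2, 'h': 2}, 'l': {'l': 2, 's': 2}, 'a': {' ': 2}, 'b': {'y': 1}, 'y': {' ': 1}, 't': {'h': 1}, 'o': {'r': 1}, 'r': {'e': 1}}
--
--     >>> get_grams("two plus two equals four.", 3)
--     {'two': {' ': 2}, 'wo ': {'p': 1, 'e': 1}, 'o p': {'l': 1}, ' pl': {'u': 1}, 'plu': {'s': 1}, 'lus': {' ': 1}, 'us ': {'t': 1}, 's t': {'w': 1}, ' tw': {'o': 1}, 'o e': {'q': 1}, ' eq': {'u': 1}, 'equ': {'a': 1}, 'qua': {'l': 1}, 'ual': {'s': 1}, 'als': {' ': 1}, 'ls ': {'f': 1}, 's f': {'o': 1}, ' fo': {'u': 1}, 'fou': {'r': 1}, 'our': {'.': 1}}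
--
--     >>> get_grams('gagggagaggcgagaaa', 0)
--     {'': {'g': 9, 'a': 7, 'c': 1}}
--
--     >>> get_grams('gag', 4)
--     {}
--     '''
--     grams_dict = {}
--     for i in range(len(text)-k): # range prevents IndexError by ignoring last k characters
--         if text[i:i+k] not in grams_dict: # if the substring of length k is not in grams_dict
--             grams_dict[text[i:i+k]] = [i+k] # create a key-value pair in grams_dict with the substring as key
--                                             # store index of the following character as a list for the value
--         elif text[i:i+k] in grams_dict: # if key already exists in grams_dict
--             grams_dict[text[i:i+k]] += [i+k] # add index of the following character to the list at that key
--
--     for k_gram in grams_dict: # for each k-gram in grams_dict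
--         sub_dict = {} # resets the inner dictionary
--         for index in grams_dict[k_gram]: # for each index stored in the list at the k-gram key
--             if text[index] not in sub_dict: # if the character following the k-gram is not a key in sub_dict
--                 sub_dict[text[index]] = 1 # creates a key_value pair for that character in sub_dict that has value 1
--             else:
--                 sub_dict[text[index]] += 1 # adds subsequent occurences to the counter at corresponding key
--
--         grams_dict[k_gram] = sub_dict # adds the sub_dict as a value to the k-gram key in grams_dict
--                                       # replaces the index list for each k-gram
--
--     return grams_dict
-- ===== SOURCE B (Python) =====
-- def get_grams(text, k):
--     # One pass: build the nested gram -> {next_char: count} dict directly,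
--     # with no intermediate index-list phase and no second pass.
--     grams_dict = {}
--     for i in range(len(text) - k):
--         inner = grams_dict.setdefault(text[i:i+k], {})
--         nxt = text[i+k]
--         inner[nxt] = inner.get(nxt, 0) + 1
--     return grams_dict
-- ===== Notes on version B (the rewrite author's own statement) =====
-- stated objective: simpler
-- what changed: One pass that builds the nested gram->{next_char:count} dict directly via setdefault, instead of A's two phases (first a gram->index-list dict, then a recounting pass that replaces each index list by a counter dict).
import Mathlib
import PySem

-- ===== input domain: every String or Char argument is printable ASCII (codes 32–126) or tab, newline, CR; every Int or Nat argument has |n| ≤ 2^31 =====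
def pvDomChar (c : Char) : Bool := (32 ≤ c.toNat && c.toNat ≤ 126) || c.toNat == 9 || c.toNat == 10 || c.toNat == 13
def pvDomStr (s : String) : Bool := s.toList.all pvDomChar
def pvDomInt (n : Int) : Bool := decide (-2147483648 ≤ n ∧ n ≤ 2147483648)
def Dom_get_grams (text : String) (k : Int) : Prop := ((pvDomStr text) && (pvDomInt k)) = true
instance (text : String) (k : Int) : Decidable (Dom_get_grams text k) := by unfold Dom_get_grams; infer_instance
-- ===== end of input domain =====

-- B builds the nested gram -> {next_char: count} dict in one pass (setdefault + increment)
-- instead of A's two phases (gram -> index-list dict, then a recounting pass): simpler decomposition.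

-- shared helper: Python's text[i] as a 1-character string; none = IndexError, excluded by Pre_
def pyCharS (text : String) (i : Int) : String :=
  ((PySem.Str.pyGet? text i).map (fun c => String.ofList [c])).getD ""

-- ===== PORT A =====
-- phase 2 inner loop of A: count the following characters stored as indices
def pvSubDictA (text : String) (idxs : List Int) : PySem.Dict String Int :=
  idxs.foldl (fun sd index =>
    if sd.contains (pyCharS text index) = false then
      sd.insert (pyCharS text index) 1
    else
      sd.insert (pyCharS text index) (sd.getD (pyCharS text index) 0 + 1)) PySem.Dict.empty

def get_grams (text : String) (k : Int) : List (String × List (String × Int)) :=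
  -- phase 1: grams_dict maps each k-gram to the list of indices of following characters
  let grams_dict : PySem.Dict String (List Int) :=
    (PySem.List.pyRange 0 (PySem.Str.len text - k) 1).foldl (fun d i =>
      if d.contains (PySem.Str.slice text (some i) (some (i + k))) = false then
        d.insert (PySem.Str.slice text (some i) (some (i + k))) [i + k]
      else if d.contains (PySem.Str.slice text (some i) (some (i + k))) then
        d.insert (PySem.Str.slice text (some i) (some (i + k)))
          (d.getD (PySem.Str.slice text (some i) (some (i + k))) [] ++ [i + k])
      else d) PySem.Dict.empty
  -- phase 2: replace each index list by the counter sub-dict, in key order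
  grams_dict.items.foldl (fun acc p => acc ++ [(p.1, (pvSubDictA text p.2).items)]) []

-- ===== PORT B =====
def get_grams_alt (text : String) (k : Int) : List (String × List (String × Int)) :=
  let grams_dict : PySem.Dict String (PySem.Dict String Int) :=
    (PySem.List.pyRange 0 (PySem.Str.len text - k) 1).foldl (fun d i =>
      -- inner = grams_dict.setdefault(text[i:i+k], {}); inner[nxt] = inner.get(nxt, 0) + 1
      d.modify (PySem.Str.slice text (some i) (some (i + k))) PySem.Dict.empty
        (fun inner => inner.modify (pyCharS text (i + k)) 0 (· + 1))) PySem.Dict.empty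
  grams_dict.items.map (fun p => (p.1, p.2.items))

-- ===== PRECONDITION & SPEC =====
-- Pre_ excludes exactly the inputs where Python raises IndexError (text[i+k] with i+k < -len(text)),
-- i.e. k < -len(text); both A and B raise there.
def Pre_get_grams (text : String) (k : Int) : Prop := -(PySem.Str.len text) ≤ k
instance (text : String) (k : Int) : Decidable (Pre_get_grams text k) := by unfold Pre_get_grams; infer_instance
def pvWitness_get_grams : String × Int := ("gag", 2)

def Spec_get_grams (text : String) (k : Int) (out : List (String × List (String × Int))) : Prop := out = get_grams_alt text k
instance (text : String) (k : Int) (out : List (String × List (String × Int))) : Decidable (Spec_get_grams text k out) := by unfold Spec_get_grams; infer_instance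

-- ===== CLAIM (what is proved, stated in full; the proofs are below) =====
def Claim_equal_get_grams : Prop := ∀ (text : String) (k : Int), Dom_get_grams text k → Pre_get_grams text k → Spec_get_grams text k (get_grams text k)

-- ===== LEMMAS AND PROOFS =====

-- the modify-based counter that B maintains, phrased on an index list
def pvCount (text : String) (idxs : List Int) : PySem.Dict String Int :=
  idxs.foldl (fun sd index => sd.modify (pyCharS text index) 0 (· + 1)) PySem.Dict.empty

theorem modify_eq_insert {κ ν : Type} [BEq κ] (d : PySem.Dict κ ν) (k : κ) (d0 : ν) (f : ν → ν) :
    d.modify k d0 f = d.insert k (f (d.getD k d0)) :=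
  PySem.Dict.ext_iff.mpr rfl

-- A's branchy counting step equals the modify step
theorem subDictA_eq_count (text : String) (idxs : List Int) :
    pvSubDictA text idxs = pvCount text idxs := by
  unfold pvSubDictA pvCount
  apply List.foldl_ext
  intro sd j _
  rw [modify_eq_insert]
  by_cases h : sd.contains (pyCharS text j) = false
  · rw [if_pos h, PySem.Dict.getD_of_not_contains sd 0 h]; norm_num
  · rw [if_neg h]

theorem count_append_singleton (text : String) (idxs : List Int) (j : Int) :
    pvCount text (idxs ++ [j]) = (pvCount text idxs).modify (pyCharS text j) 0 (· + 1) := by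
  unfold pvCount
  rw [List.foldl_append]
  rfl

-- the invariant between A's phase-1 dict and B's nested dict, over any prefix of the index range
theorem keys_of_inv (ad : PySem.Dict String (List Int)) (bd : PySem.Dict String (PySem.Dict String Int))
    (F : List Int → PySem.Dict String Int)
    (hinv : bd.items = ad.items.map (fun p => (p.1, F p.2))) : bd.keys = ad.keys := by
  show bd.items.map (·.1) = ad.items.map (·.1)
  rw [hinv, List.map_map]
  rfl

theorem contains_of_inv (ad : PySem.Dict String (List Int)) (bd : PySem.Dict String (PySem.Dict String Int))
    (F : List Int → PySem.Dict String Int)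
    (hinv : bd.items = ad.items.map (fun p => (p.1, F p.2))) (g : String) :
    bd.contains g = ad.contains g := by
  rw [PySem.Dict.contains_eq_decide_mem_keys, PySem.Dict.contains_eq_decide_mem_keys,
    keys_of_inv ad bd F hinv]

theorem getD_of_inv (ad : PySem.Dict String (List Int)) (bd : PySem.Dict String (PySem.Dict String Int))
    (F : List Int → PySem.Dict String Int)
    (hinv : bd.items = ad.items.map (fun p => (p.1, F p.2))) (hnd : ad.keys.Nodup)
    (g : String) (hc : ad.contains g = true) :
    bd.getD g PySem.Dict.empty = F (ad.getD g []) := by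
  have hs : (ad.get? g).isSome := by rw [← PySem.Dict.contains_eq_isSome_get?]; exact hc
  obtain ⟨v, hv⟩ := Option.isSome_iff_exists.mp hs
  have hmem : (g, v) ∈ ad.items := PySem.Dict.mem_items_of_get?_eq_some ad hv
  have hmemb : (g, F v) ∈ bd.items := by
    rw [hinv]; exact List.mem_map.mpr ⟨(g, v), hmem, rfl⟩
  have hndb : bd.keys.Nodup := by rw [keys_of_inv ad bd F hinv]; exact hnd
  rw [PySem.Dict.getD_of_mem_items bd hmemb hndb, PySem.Dict.getD_of_get?_eq_some ad [] hv]

-- A's phase-1 branchy step is always an insert of getD ++ [j]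
theorem a_step_eq (d : PySem.Dict String (List Int)) (g : String) (j : Int) :
    (if d.contains g = false then d.insert g [j]
     else if d.contains g then d.insert g (d.getD g [] ++ [j]) else d) =
    d.insert g (d.getD g [] ++ [j]) := by
  by_cases h : d.contains g = false
  · rw [if_pos h, PySem.Dict.getD_of_not_contains d [] h]; rfl
  · rw [if_neg h, if_pos (by revert h; cases d.contains g <;> simp)]

-- the invariant between A's phase-1 dict and B's nested dict, over any list of loop indices
theorem nested_invariant (text : String) (k : Int) (L : List Int)
    (ad : PySem.Dict String (List Int)) (bd : PySem.Dict String (PySem.Dict String Int))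
    (hnd : ad.keys.Nodup)
    (hinv : bd.items = ad.items.map (fun p => (p.1, pvCount text p.2))) :
    (L.foldl (fun d i =>
      if d.contains (PySem.Str.slice text (some i) (some (i + k))) = false then
        d.insert (PySem.Str.slice text (some i) (some (i + k))) [i + k]
      else if d.contains (PySem.Str.slice text (some i) (some (i + k))) then
        d.insert (PySem.Str.slice text (some i) (some (i + k)))
          (d.getD (PySem.Str.slice text (some i) (some (i + k))) [] ++ [i + k])
      else d) ad).keys.Nodup ∧
    (L.foldl (fun d i =>
      d.modify (PySem.Str.slice text (some i) (some (i + k))) PySem.Dict.empty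
        (fun inner => inner.modify (pyCharS text (i + k)) 0 (· + 1))) bd).items =
    (L.foldl (fun d i =>
      if d.contains (PySem.Str.slice text (some i) (some (i + k))) = false then
        d.insert (PySem.Str.slice text (some i) (some (i + k))) [i + k]
      else if d.contains (PySem.Str.slice text (some i) (some (i + k))) then
        d.insert (PySem.Str.slice text (some i) (some (i + k)))
          (d.getD (PySem.Str.slice text (some i) (some (i + k))) [] ++ [i + k])
      else d) ad).items.map (fun p => (p.1, pvCount text p.2)) := by
  induction L generalizing ad bd with
  | nil => exact ⟨hnd, hinv⟩
  | cons i L ih =>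
    simp only [List.foldl_cons]
    set g := PySem.Str.slice text (some i) (some (i + k)) with hg
    set j := i + k with hj
    rw [a_step_eq ad g j, modify_eq_insert]
    by_cases hc : ad.contains g = true
    · -- existing key: both sides overwrite in place
      apply ih
      · rw [PySem.Dict.keys_insert_of_contains _ _ hc]; exact hnd
      · rw [PySem.Dict.items_insert_of_contains _ _ hc,
          PySem.Dict.items_insert_of_contains _ _ (by rw [contains_of_inv ad bd _ hinv]; exact hc),
          hinv, List.map_map, List.map_map]
        apply List.map_congr_left
        intro p _
        by_cases hp : p.1 == g
        · simp only [Function.comp, hp, if_pos]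
          rw [getD_of_inv ad bd _ hinv hnd g hc, ← count_append_singleton]
        · simp only [Function.comp, hp]
          rw [if_neg (by simp_all), if_neg (by simp_all)]
    · -- new key: both sides append
      have hcf : ad.contains g = false := by revert hc; cases ad.contains g <;> simp
      apply ih
      · rw [PySem.Dict.keys_insert_of_not_contains _ _ hcf]
        refine List.nodup_append.mpr ⟨hnd, List.nodup_singleton g, ?_⟩
        intro x hx y hy
        rw [List.mem_singleton] at hy; subst hy
        rw [← PySem.Dict.contains_iff_mem_keys] at hx
        intro he; subst he
        rw [hx] at hcf; exact Bool.true_eq_false.mp hcf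
      · rw [PySem.Dict.items_insert_of_not_contains _ _ hcf,
          PySem.Dict.items_insert_of_not_contains _ _ (by rw [contains_of_inv ad bd _ hinv]; exact hcf),
          List.map_append, hinv]
        congr 1
        rw [PySem.Dict.getD_of_not_contains bd PySem.Dict.empty
          (by rw [contains_of_inv ad bd _ hinv]; exact hcf)]
        rw [PySem.Dict.getD_of_not_contains ad [] hcf]
        rfl

-- ===== VERDICT (by name: the statement is the Claim_ definition above) =====
theorem get_grams_spec : Claim_equal_get_grams := by
  intro text k _ _
  unfold Spec_get_grams get_grams get_grams_alt
  dsimp only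
  obtain ⟨-, hinv⟩ := nested_invariant text k
    (PySem.List.pyRange 0 (PySem.Str.len text - k) 1)
    PySem.Dict.empty PySem.Dict.empty List.nodup_nil rfl
  rw [hinv, List.map_map]
  refine (PySem.List.foldl_append_singleton_eq_map _ _ []).trans ?_
  simp only [List.nil_append]
  apply List.map_congr_left
  intro p _
  simp only [Function.comp]
  rw [subDictA_eq_count]
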